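-- pv_equiv track=rewrite | github.com/DataRedKite/datagalaxy | client/utils.py | split_path_subpath
-- ===== SOURCE A (Python) =====
-- def split_path_subpath(path):
--     """
--     function used to split a path into its sub-paths
--
--     Parameters
--     __________
--     path : str
--         Path which needs to be split
--
--     Returns
--     ________
--     List(String)
--         List of strings containing all the sub-paths linked with the given path
--     """
--
--     path_list = path.split(sep='/')
--     subpath = []
--     for i in path_list:
--         if len(subpath) == 0:
--             subpath.append(i)
--         else:
--             subpath.append(subpath[-1] + '/' + i)
--     return subpath
-- ===== SOURCE B (Python) =====
-- def split_path_subpath(path):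
--     parts = path.split(sep='/')
--     return ['/'.join(parts[:i + 1]) for i in range(len(parts))]
-- ===== Notes on version B (the rewrite author's own statement) =====
-- stated objective: idiomatic
-- what changed: Replaces the stateful accumulator loop (each element built from subpath[-1]) with a stateless comprehension that reconstructs each cumulative prefix independently as '/'.join(parts[:i+1]).
import Mathlib
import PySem

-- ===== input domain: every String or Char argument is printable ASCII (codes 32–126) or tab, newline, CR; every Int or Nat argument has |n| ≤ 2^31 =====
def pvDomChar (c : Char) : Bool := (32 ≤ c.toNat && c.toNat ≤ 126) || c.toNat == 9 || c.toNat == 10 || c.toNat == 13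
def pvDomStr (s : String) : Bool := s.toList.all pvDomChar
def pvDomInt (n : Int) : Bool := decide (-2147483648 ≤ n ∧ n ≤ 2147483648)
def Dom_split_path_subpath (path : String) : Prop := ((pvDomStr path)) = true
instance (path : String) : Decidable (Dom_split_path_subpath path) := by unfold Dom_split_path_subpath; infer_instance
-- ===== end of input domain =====

-- B replaces A's stateful accumulator loop (subpath[-1] + '/' + i) with a stateless
-- comprehension joining front-slices of the split list; same output, idiomatic rewrite.

-- ===== PORT A =====
-- the loop body: append i, or subpath[-1] + '/' + i (strings handled as List Char via PySem.Chars, exact on the ASCII domain)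
def splitPathStepA (subpath : List (List Char)) (i : List Char) : List (List Char) :=
  if subpath.length == 0 then subpath ++ [i]
  else subpath ++ [PySem.List.pyGetD subpath (-1) [] ++ ['/'] ++ i]

def split_path_subpath (path : String) : List String :=
  let path_list := PySem.Chars.splitOn path.toList ['/']
  ((path_list.foldl splitPathStepA []).map String.ofList)

-- ===== PORT B =====
def split_path_subpath_alt (path : String) : List String :=
  let parts := PySem.Chars.splitOn path.toList ['/']
  ((PySem.List.pyRange 0 (parts.length : Int)).map
    (fun i => String.ofList (PySem.Chars.join ['/'] (PySem.List.slice parts none (some (i + 1))))))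

-- ===== PRECONDITION & SPEC =====
def Spec_split_path_subpath (path : String) (out : List String) : Prop := out = split_path_subpath_alt path
instance (path : String) (out : List String) : Decidable (Spec_split_path_subpath path out) := by unfold Spec_split_path_subpath; infer_instance

-- ===== CLAIM (what is proved, stated in full; the proofs are below) =====
def Claim_equal_split_path_subpath : Prop := ∀ (path : String), Dom_split_path_subpath path → Spec_split_path_subpath path (split_path_subpath path)

-- ===== LEMMAS AND PROOFS =====

-- the values A's loop appends after the first one, as a recursion on the remaining segments
def chainG (s : List Char) : List (List Char) → List (List Char)
  | [] => []
  | x :: xs => (s ++ ['/'] ++ x) :: chainG (s ++ ['/'] ++ x) xs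

theorem foldl_stepA_append (pl : List (List Char)) :
    ∀ (pre : List (List Char)) (s : List Char),
      List.foldl splitPathStepA (pre ++ [s]) pl = pre ++ [s] ++ chainG s pl := by
  induction pl with
  | nil => intro pre s; simp [chainG]
  | cons x xs ih =>
    intro pre s
    have hstep : splitPathStepA (pre ++ [s]) x = (pre ++ [s]) ++ [s ++ ['/'] ++ x] := by
      simp [splitPathStepA, PySem.List.pyGetD_neg_one_append_singleton]
    simp only [List.foldl_cons, hstep, chainG]
    rw [List.append_assoc pre [s]]
    have := ih (pre ++ [s]) (s ++ ['/'] ++ x)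
    simp only [List.append_assoc] at this ⊢
    exact this

theorem join_glue (a b : List Char) (l : List (List Char)) :
    PySem.Chars.join ['/'] ((a ++ ['/'] ++ b) :: l) = a ++ ['/'] ++ PySem.Chars.join ['/'] (b :: l) := by
  cases l with
  | nil => simp [PySem.Chars.join_singleton]
  | cons c l' => simp [PySem.Chars.join_cons_cons]

theorem cons_chainG_eq_map (xs : List (List Char)) :
    ∀ (x : List Char),
      x :: chainG x xs =
        (List.range (xs.length + 1)).map
          (fun k => PySem.Chars.join ['/'] ((x :: xs).take (k + 1))) := by
  induction xs with
  | nil => intro x; simp [chainG, PySem.Chars.join_singleton]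
  | cons y ys ih =>
    intro x
    have ihy := ih (x ++ ['/'] ++ y)
    simp only [chainG] at ihy ⊢
    rw [List.length_cons, List.range_succ_eq_map, List.map_cons, List.map_map]
    have h0 : PySem.Chars.join ['/'] (List.take (0 + 1) (x :: y :: ys)) = x := by
      simp [PySem.Chars.join_singleton]
    rw [h0]
    congr 1
    rw [ihy]
    apply List.map_congr_left
    intro k _
    simp only [Function.comp, List.take_succ_cons, join_glue, PySem.Chars.join_cons_cons]

theorem lists_eq (pl : List (List Char)) :
    List.foldl splitPathStepA [] pl =
      (List.range pl.length).map
        (fun k => PySem.Chars.join ['/'] (pl.take (k + 1))) := by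
  cases pl with
  | nil => simp
  | cons x xs =>
    have h1 : List.foldl splitPathStepA [] (x :: xs) = [x] ++ chainG x xs := by
      have hstep : splitPathStepA [] x = [] ++ [x] := by simp [splitPathStepA]
      simp only [List.foldl_cons, hstep]
      exact foldl_stepA_append xs [] x
    rw [h1]
    simpa using cons_chainG_eq_map xs x

-- ===== VERDICT (by name: the statement is the Claim_ definition above) =====
theorem split_path_subpath_spec : Claim_equal_split_path_subpath := by
  intro path _
  unfold Spec_split_path_subpath split_path_subpath split_path_subpath_alt
  simp only [PySem.List.pyRange_zero_natCast, List.map_map, lists_eq]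
  apply List.map_congr_left
  intro k _
  simp only [Function.comp]
  rw [show ((k : Int) + 1) = ((k + 1 : Nat) : Int) by push_cast; ring,
    PySem.List.slice_to_natCast]
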